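-- pv_equiv track=rewrite | github.com/jroweboy/evolve-machine-game | tools/Darwin/tilificator/tilificator/common.py | combinationsIncreasing
-- ===== SOURCE A (Python) =====
-- import itertools
--
-- def firstNotNone(listOfValues):
--     for value in listOfValues:
--         if value is not None:
--             return value
--     return None
--
-- def combinationsIncreasing(matchList):
--     if matchList == []:  # if spriteTiles == []:
--         return []
--     positionsList = []
--     for matchPositionX in matchList[0]:
--         if len(matchList) > 1:  # if len(spriteTiles) > 1:
--             positionsListRest = combinationsIncreasing(matchList[1:])
--             positionsListRestGreater = [xList for xList in positionsListRest if ((firstNotNone(xList) is None or matchPositionX is None) or firstNotNone(xList) >= matchPositionX)]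
--             if positionsListRestGreater != []:
--                 positionsList.extend(expandedProduct([matchPositionX], positionsListRestGreater))
--         else:
--             positionsList.append([matchPositionX])
--     return positionsList
--
-- def expandedProduct(a, b):
--     if b == []:
--         return [a]
--     p = list(itertools.product(a, b))
--     return [list(itertools.chain([sublist[0]], sublist[1])) if(isinstance(sublist[1], (list, tuple))) else [sublist[0], sublist[1]] for sublist in p]
-- ===== SOURCE B (Python) =====
-- import itertools
--
-- def combinationsIncreasing(matchList):
--     # Flat enumeration instead of recursion: generate the full cartesian
--     # product and keep a tuple iff one backward scan shows every non-None
--     # element is <= the first non-None element of its suffix.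
--     if not matchList:
--         return []
--     out = []
--     for combo in itertools.product(*matchList):
--         nxt = None  # first non-None value of the suffix scanned so far
--         ok = True
--         for x in reversed(combo):
--             if x is not None:
--                 if nxt is not None and nxt < x:
--                     ok = False
--                     break
--                 nxt = x
--         if ok:
--             out.append(list(combo))
--     return out
-- ===== Notes on version B (the rewrite author's own statement) =====
-- stated objective: alternative
-- what changed: B replaces A's per-element recursive rebuild-and-filter with a flat enumeration: one cartesian product of all rows followed by a single backward scan per tuple checking the non-decreasing-with-wildcards condition.
import Mathlib
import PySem

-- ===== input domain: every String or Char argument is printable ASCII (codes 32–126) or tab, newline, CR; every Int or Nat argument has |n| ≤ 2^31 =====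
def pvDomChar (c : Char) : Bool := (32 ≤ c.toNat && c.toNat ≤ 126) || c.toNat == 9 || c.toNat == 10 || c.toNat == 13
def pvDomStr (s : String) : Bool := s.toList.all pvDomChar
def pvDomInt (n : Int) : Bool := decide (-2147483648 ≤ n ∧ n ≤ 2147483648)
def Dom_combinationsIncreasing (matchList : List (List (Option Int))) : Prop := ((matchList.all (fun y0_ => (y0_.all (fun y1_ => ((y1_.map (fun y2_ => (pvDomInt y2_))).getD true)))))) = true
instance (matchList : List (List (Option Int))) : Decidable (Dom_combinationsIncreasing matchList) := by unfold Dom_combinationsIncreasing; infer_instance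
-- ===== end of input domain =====

-- B enumerates the full cartesian product and filters each tuple with one backward scan,
-- instead of A's recursive per-element rebuild-and-filter; return value proved identical.


-- ===== PORT A =====
def firstNotNone (listOfValues : List (Option Int)) : Option Int :=
  match listOfValues with
  | [] => none
  | value :: rest =>
    match value with
    | some v => some v
    | none => firstNotNone rest

-- condition of A's filter comprehension, in A's evaluation order
def condA (x : Option Int) (xList : List (Option Int)) : Bool :=
  ((firstNotNone xList).isNone || x.isNone) ||
    (match firstNotNone xList, x with
     | some f, some m => decide (f ≥ m)
     | _, _ => false)

-- expandedProduct(a, b); here b's elements are always lists, so the isinstance branch taken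
-- is the list/chain one (exact for the call sites in this file)
def expandedProduct (a : List (Option Int)) (b : List (List (Option Int))) : List (List (Option Int)) :=
  if b = [] then [a]
  else (a.flatMap (fun x => b.map (fun s => (x, s)))).map (fun p => p.1 :: p.2)

def combinationsIncreasing (matchList : List (List (Option Int))) : List (List (Option Int)) :=
  match matchList with
  | [] => []
  | row :: rest =>
    row.foldl
      (fun acc x =>
        if rest.length + 1 > 1 then
          let plr := combinationsIncreasing rest
          let plrg := plr.filter (fun xList => condA x xList)
          if plrg ≠ [] then acc ++ expandedProduct [x] plrg else acc
        else acc ++ [[x]]) []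

-- ===== PORT B =====
-- itertools.product(*matchList) in product order (rightmost factor varies fastest)
def prodLists (rows : List (List (Option Int))) : List (List (Option Int)) :=
  match rows with
  | [] => [[]]
  | row :: rest => row.flatMap (fun x => (prodLists rest).map (fun t => x :: t))

-- B's backward scan over one tuple; the early `break` with ok=False is ported as
-- returning `none` (failure), `some nxt` carries the loop state
def scanBack (l : List (Option Int)) (nxt : Option Int) : Option (Option Int) :=
  match l with
  | [] => some nxt
  | x :: rest =>
    match x with
    | none => scanBack rest nxt
    | some v =>
      match nxt with
      | some n => if n < v then none else scanBack rest (some v)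
      | none => scanBack rest (some v)

def combinationsIncreasing_alt (matchList : List (List (Option Int))) : List (List (Option Int)) :=
  match matchList with
  | [] => []
  | _ :: _ => (prodLists matchList).filter (fun c => (scanBack c.reverse none).isSome)

-- ===== PRECONDITION & SPEC =====
def Spec_combinationsIncreasing (matchList : List (List (Option Int))) (out : List (List (Option Int))) : Prop := out = combinationsIncreasing_alt matchList
instance (matchList : List (List (Option Int))) (out : List (List (Option Int))) : Decidable (Spec_combinationsIncreasing matchList out) := by unfold Spec_combinationsIncreasing; infer_instance

-- ===== CLAIM (what is proved, stated in full; the proofs are below) =====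
def Claim_equal_combinationsIncreasing : Prop := ∀ (matchList : List (List (Option Int))), Dom_combinationsIncreasing matchList → Spec_combinationsIncreasing matchList (combinationsIncreasing matchList)

-- ===== LEMMAS AND PROOFS =====

def good (c : List (Option Int)) : Bool := (scanBack c.reverse none).isSome

theorem scanBack_append (l l' : List (Option Int)) (s : Option Int) :
    scanBack (l ++ l') s = (scanBack l s).bind (fun s' => scanBack l' s') := by
  induction l generalizing s with
  | nil => simp [scanBack]
  | cons a rest ih =>
    cases a with
    | none => simp [scanBack, ih]
    | some v =>
      cases s with
      | none => simp [scanBack, ih]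
      | some n =>
        by_cases h : n < v <;> simp [scanBack, h, ih]

theorem scanBack_state (t : List (Option Int)) (s : Option Int)
    (h : scanBack t.reverse none = some s) : s = firstNotNone t := by
  induction t generalizing s with
  | nil => simp [scanBack] at h; simp [firstNotNone, h.symm]
  | cons a rest ih =>
    rw [List.reverse_cons, scanBack_append] at h
    cases hr : scanBack rest.reverse none with
    | none => rw [hr] at h; simp at h
    | some s' =>
      rw [hr] at h
      have hs' := ih s' hr
      cases a with
      | none => simp [scanBack] at h; simp [firstNotNone, ← h, hs']
      | some v =>
        cases s'' : s' with
        | none => rw [s''] at h; simp [scanBack] at h; simp [firstNotNone, ← h]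
        | some n =>
          rw [s''] at h
          by_cases hlt : n < v
          · simp [scanBack, hlt] at h
          · simp [scanBack, hlt] at h; simp [firstNotNone, ← h]

theorem good_cons (x : Option Int) (t : List (Option Int)) :
    good (x :: t) = (good t && condA x t) := by
  unfold good
  rw [List.reverse_cons, scanBack_append]
  cases hr : scanBack t.reverse none with
  | none => simp
  | some s =>
    have hs := scanBack_state t s hr
    cases x with
    | none => simp [scanBack, condA]
    | some v =>
      cases s with
      | none =>
        simp [scanBack, condA, ← hs]
      | some n =>
        by_cases hlt : n < v
        · simp [scanBack, hlt, condA, ← hs]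
        · simp [scanBack, hlt, condA, ← hs]; omega

theorem filter_flatMap_comm {α β : Type} (l : List α) (f : α → List β) (p : β → Bool) :
    (l.flatMap f).filter p = l.flatMap (fun a => (f a).filter p) := by
  induction l with
  | nil => rfl
  | cons a rest ih => simp [List.flatMap_cons, List.filter_append, ih]

theorem expandedProduct_single (x : Option Int) (b : List (List (Option Int))) (hb : b ≠ []) :
    expandedProduct [x] b = b.map (fun t => x :: t) := by
  unfold expandedProduct
  simp [hb, List.map_map, Function.comp]

theorem foldl_append_step {α β : Type} (g : α → List β) (row : List α) (init : List β) :
    row.foldl (fun acc x => acc ++ g x) init = init ++ row.flatMap g := by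
  induction row generalizing init with
  | nil => simp
  | cons y ys ih => simp [List.foldl_cons, ih, List.append_assoc]

-- A equals the filtered full product (for every input; the [] case is [] on both sides)
theorem combinationsIncreasing_eq (matchList : List (List (Option Int))) :
    combinationsIncreasing matchList = combinationsIncreasing_alt matchList := by
  induction matchList with
  | nil => rfl
  | cons row rest ih =>
    cases rest with
    | nil =>
      show row.foldl _ [] = _
      have h1 : row.foldl (fun acc (x : Option Int) => acc ++ [[x]]) [] = row.map (fun x => [x]) := by
        have := PySem.List.foldl_append_singleton_eq_map (f := fun x : Option Int => [x]) (l := row) (acc := [])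
        simpa using this
      rw [show (fun acc (x : Option Int) =>
          if ([] : List (List (Option Int))).length + 1 > 1 then
            let plr := combinationsIncreasing []
            let plrg := plr.filter (fun xList => condA x xList)
            if plrg ≠ [] then acc ++ expandedProduct [x] plrg else acc
          else acc ++ [[x]]) = fun acc (x : Option Int) => acc ++ [[x]] by
        funext acc x; simp]
      rw [h1]
      show _ = (prodLists [row]).filter good
      have : ∀ x : Option Int, good [x] = true := by
        intro x; cases x <;> simp [good, scanBack]
      have h2 : ∀ (r : List (Option Int)), r.map (fun x => ([x] : List (Option Int)))
          = r.flatMap (fun a => [[a]]) := by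
        intro r; induction r with
        | nil => rfl
        | cons a r ihr => simp [ihr]
      simp only [prodLists, filter_flatMap_comm]
      simp [this]
      exact h2 row
    | cons r2 rs =>
      -- A on row :: r2 :: rs
      have hstep : ∀ (acc : List (List (Option Int))) (x : Option Int),
          (if (r2 :: rs).length + 1 > 1 then
            let plr := combinationsIncreasing (r2 :: rs)
            let plrg := plr.filter (fun xList => condA x xList)
            if plrg ≠ [] then acc ++ expandedProduct [x] plrg else acc
          else acc ++ [[x]])
          = acc ++ ((prodLists (r2 :: rs)).filter (fun t => good (x :: t))).map (fun t => x :: t) := by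
        intro acc x
        have hlen : (r2 :: rs).length + 1 > 1 := by simp
        have hih : combinationsIncreasing (r2 :: rs) = (prodLists (r2 :: rs)).filter good := by
          rw [ih]; rfl
        simp only [if_pos hlen, hih]
        have hff : ((prodLists (r2 :: rs)).filter good).filter (fun xList => condA x xList)
            = (prodLists (r2 :: rs)).filter (fun t => good (x :: t)) := by
          rw [List.filter_filter]
          apply List.filter_congr
          intro t _
          rw [good_cons]
          cases condA x t <;> cases good t <;> simp
        rw [hff]
        by_cases hne : (prodLists (r2 :: rs)).filter (fun t => good (x :: t)) = []
        · simp [hne]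
        · simp [hne, expandedProduct_single x _ hne]
      calc (row.foldl (fun acc x =>
            if (r2 :: rs).length + 1 > 1 then
              let plr := combinationsIncreasing (r2 :: rs)
              let plrg := plr.filter (fun xList => condA x xList)
              if plrg ≠ [] then acc ++ expandedProduct [x] plrg else acc
            else acc ++ [[x]]) [])
          = row.foldl (fun acc x =>
              acc ++ ((prodLists (r2 :: rs)).filter (fun t => good (x :: t))).map (fun t => x :: t)) [] := by
            exact PySem.List.foldl_congr_mem (init := []) (l := row) (h := fun acc x _ => hstep acc x)
        _ = row.flatMap (fun x =>
              ((prodLists (r2 :: rs)).filter (fun t => good (x :: t))).map (fun t => x :: t)) := by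
            rw [foldl_append_step]; simp
        _ = combinationsIncreasing_alt (row :: r2 :: rs) := by
            show _ = (prodLists (row :: r2 :: rs)).filter good
            rw [show prodLists (row :: r2 :: rs)
                = row.flatMap (fun x => (prodLists (r2 :: rs)).map (fun t => x :: t)) from rfl]
            rw [filter_flatMap_comm]
            apply List.flatMap_congr
            intro x _
            rw [List.filter_map]
            rfl

-- ===== VERDICT (by name: the statement is the Claim_ definition above) =====
theorem combinationsIncreasing_spec : Claim_equal_combinationsIncreasing := by
  intro matchList _
  exact combinationsIncreasing_eq matchList
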